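-- pv_equiv track=rewrite | github.com/evannorstrand-mp/Andromeda | experiments/colt5_attention/triton_coor_descent.py | num_to_groups
-- ===== SOURCE A (Python) =====
-- def num_to_groups(num, groups):
--     assert 0 < groups <= num
--     floor = num // groups
--     remainder = num % groups
--     out = []
--     for ind in range(groups):
--         out.append(floor + int(ind < remainder))
--     assert sum(out) == num
--     return out
-- ===== SOURCE B (Python) =====
-- def num_to_groups(num, groups):
--     assert 0 < groups <= num
--     out = []
--     remaining = num
--     for g in range(groups, 0, -1):
--         take = -(-remaining // g)  # ceil division: this group gets its fair share
--         out.append(take)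
--         remaining -= take
--     assert sum(out) == num
--     return out
-- ===== Notes on version B (the rewrite author's own statement) =====
-- stated objective: alternative
-- what changed: Instead of precomputing floor/remainder once and branching per index, B runs a greedy loop in which each group takes the ceiling of the remaining average (ceil(remaining/groups_left)) and the remainder is redistributed implicitly by re-dividing at every step.
import Mathlib
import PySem

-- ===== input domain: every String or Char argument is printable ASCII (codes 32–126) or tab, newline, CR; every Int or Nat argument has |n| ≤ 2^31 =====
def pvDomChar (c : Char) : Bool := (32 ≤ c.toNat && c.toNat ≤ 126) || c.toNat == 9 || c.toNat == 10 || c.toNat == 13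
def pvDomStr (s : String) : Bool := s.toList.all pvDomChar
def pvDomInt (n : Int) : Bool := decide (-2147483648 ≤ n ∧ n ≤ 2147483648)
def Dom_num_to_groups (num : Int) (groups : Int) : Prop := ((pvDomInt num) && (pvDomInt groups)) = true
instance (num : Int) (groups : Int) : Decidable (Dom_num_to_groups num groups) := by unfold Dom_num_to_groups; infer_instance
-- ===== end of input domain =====

-- B replaces A's precomputed floor/remainder with a greedy loop: each group takes the
-- ceiling of the remaining average; objective: alternative (same cost, different algorithm).

-- ===== PORT A =====
-- loop: for ind in range(groups): out.append(floor + int(ind < remainder))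
def num_to_groups (num : Int) (groups : Int) : List Int :=
  let floor := PySem.Int.floordiv num groups
  let remainder := PySem.Int.mod num groups
  (PySem.List.pyRange 0 groups 1).foldl
    (fun out ind => out ++ [floor + (if ind < remainder then 1 else 0)]) []

-- ===== PORT B =====
-- loop over range(groups, 0, -1): take = -(-remaining // g); append; remaining -= take.
-- Ported as forward recursion on the countdown g (g, g-1, …, 1), which produces the
-- appends in the same order as Source B's list.
def num_to_groups_alt_go (remaining : Int) (g : Nat) : List Int :=
  match g with
  | 0 => []
  | Nat.succ g' =>
      let take := -(PySem.Int.floordiv (-remaining) (g' + 1 : Nat))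
      take :: num_to_groups_alt_go (remaining - take) g'

def num_to_groups_alt (num : Int) (groups : Int) : List Int :=
  num_to_groups_alt_go num groups.toNat

-- ===== PRECONDITION & SPEC =====
-- Pre_: A's leading 'assert 0 < groups <= num' raises AssertionError otherwise.
def Pre_num_to_groups (num : Int) (groups : Int) : Prop := 0 < groups ∧ groups ≤ num
instance (num : Int) (groups : Int) : Decidable (Pre_num_to_groups num groups) := by
  unfold Pre_num_to_groups; infer_instance

def pvWitness_num_to_groups : Int × Int := (7, 3)

def Spec_num_to_groups (num : Int) (groups : Int) (out : List Int) : Prop := out = num_to_groups_alt num groups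
instance (num : Int) (groups : Int) (out : List Int) : Decidable (Spec_num_to_groups num groups out) := by
  unfold Spec_num_to_groups; infer_instance

-- ===== CLAIM (what is proved, stated in full; the proofs are below) =====
def Claim_equal_num_to_groups : Prop := ∀ (num : Int) (groups : Int), Dom_num_to_groups num groups → Pre_num_to_groups num groups → Spec_num_to_groups num groups (num_to_groups num groups)

-- ===== LEMMAS AND PROOFS =====

-- A's append-loop is a map over the range
theorem foldl_append_map {α β : Type} (f : α → β) (l : List α) (acc : List β) :
    l.foldl (fun out x => out ++ [f x]) acc = acc ++ l.map f := by
  induction l generalizing acc with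
  | nil => simp
  | cons a l ih => simp [List.foldl, ih]

-- the threshold map over range n splits into two replicated blocks
theorem map_range_ite_blocks (n r : Nat) (f : Int) (h : r ≤ n) :
    (List.range n).map (fun k => if k < r then f + 1 else f)
      = List.replicate r (f + 1) ++ List.replicate (n - r) f := by
  induction n with
  | zero =>
    have h0 : r = 0 := by omega
    simp [h0]
  | succ n ih =>
    rw [List.range_succ, List.map_append]
    by_cases hr : r ≤ n
    · rw [ih hr]
      have h2 : ¬ n < r := by omega
      have h3 : n + 1 - r = (n - r) + 1 := by omega
      rw [h3, List.replicate_succ']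
      simp [h2]
    · have hrn : r = n + 1 := by omega
      subst hrn
      have h1 : ∀ k ∈ List.range n, (if k < n + 1 then f + 1 else f) = f + 1 := by
        intro k hk
        rw [List.mem_range] at hk
        exact if_pos (by omega)
      rw [List.map_congr_left h1, List.map_const']
      have h4 : n < n + 1 := Nat.lt_succ_self n
      simp only [List.map_cons, List.map_nil, if_pos h4, Nat.sub_self,
        List.replicate_zero, List.append_nil, ← List.replicate_succ', List.length_range]

-- A's loop equals the two-block form, for any floor f and remainder 0 ≤ r < g
theorem loop_eq_blocks (f r g : Int) (hr0 : 0 ≤ r) (hrlt : r < g) :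
    (PySem.List.pyRange 0 g 1).foldl
        (fun out ind => out ++ [f + (if ind < r then 1 else 0)]) []
      = List.replicate r.toNat (f + 1) ++ List.replicate (g - r).toNat f := by
  rw [foldl_append_map, List.nil_append, PySem.List.pyRange_one, sub_zero, List.map_map]
  have hcast : (g - r).toNat = g.toNat - r.toNat := by omega
  rw [hcast, ← map_range_ite_blocks g.toNat r.toNat f (by omega)]
  apply List.map_congr_left
  intro k hk
  simp only [Function.comp_apply, zero_add]
  by_cases hki : k < r.toNat
  · have hI : (k : Int) < r := by omega
    simp [hI, hki]
  · have hI : ¬ (k : Int) < r := by omega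
    simp [hI, hki]

-- B's greedy loop also equals the two-block form, by induction on the countdown
theorem go_eq_blocks (g : Nat) : ∀ n : Int, 0 < (g : Int) → (g : Int) ≤ n →
    num_to_groups_alt_go n g
      = List.replicate (n % (g : Int)).toNat (n / (g : Int) + 1)
          ++ List.replicate ((g : Int) - n % (g : Int)).toNat (n / (g : Int)) := by
  induction g with
  | zero => intro n h; omega
  | succ g' ih =>
    intro n _ hle
    have hgpos : (0 : Int) < (g' + 1 : Nat) := by exact_mod_cast Nat.succ_pos g'
    set G : Int := ((g' + 1 : Nat) : Int) with hG
    have hgg : G = (g' : Int) + 1 := by simp [hG]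
    have hq : n / G * G + n % G = n := Int.ediv_mul_add_emod n G
    have hr0 : 0 ≤ n % G := Int.emod_nonneg n (by omega)
    have hrlt : n % G < G := Int.emod_lt_of_pos n hgpos
    have hq1 : 1 ≤ n / G := (Int.le_ediv_iff_mul_le hgpos).mpr (by omega)
    -- take = ceil(n / G)
    have htake : -(PySem.Int.floordiv (-n) G) = n / G + (if 0 < n % G then 1 else 0) := by
      rw [PySem.Int.floordiv_eq_ediv_of_pos hgpos]
      by_cases h0 : 0 < n % G
      · simp only [if_pos h0]
        have hrep : -n = (G - n % G) + (-(n / G) - 1) * G := by linear_combination hq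
        have : (-n) / G = -(n / G) - 1 := by
          rw [hrep, Int.add_mul_ediv_right _ _ (by omega : G ≠ 0)]
          have : (G - n % G) / G = 0 := Int.ediv_eq_zero_of_lt (by omega) (by omega)
          omega
        omega
      · simp only [if_neg h0]
        have hr' : n % G = 0 := by omega
        have hrep : -n = 0 + (-(n / G)) * G := by linear_combination hq - hr'
        have : (-n) / G = -(n / G) := by
          rw [hrep, Int.add_mul_ediv_right _ _ (by omega : G ≠ 0)]
          simp
        omega
    unfold num_to_groups_alt_go
    simp only
    rw [htake]
    by_cases h0 : 0 < n % G
    · -- this group takes n/G + 1; remainder decreases by one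
      simp only [if_pos h0]
      have hrem : n - (n / G + 1) = (n % G - 1) + n / G * (g' : Int) := by
        linear_combination -hq + (n / G) * hgg
      by_cases hg'0 : g' = 0
      · exfalso; subst hg'0; omega
      · have hg'pos : (0 : Int) < (g' : Int) := by
          exact_mod_cast Nat.pos_of_ne_zero hg'0
        have hle' : (g' : Int) ≤ n - (n / G + 1) := by nlinarith [hrem]
        rw [ih (n - (n / G + 1)) hg'pos hle']
        have hsmall : (n % G - 1) / (g' : Int) = 0 :=
          Int.ediv_eq_zero_of_lt (by omega) (by omega)
        have hdiv : (n - (n / G + 1)) / (g' : Int) = n / G := by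
          rw [hrem, Int.add_mul_ediv_right _ _ (by omega : (g' : Int) ≠ 0)]
          omega
        have hmod : (n - (n / G + 1)) % (g' : Int) = n % G - 1 := by
          rw [hrem, mul_comm (n / G) ((g' : Nat) : Int), Int.add_mul_emod_self_left]
          exact Int.emod_eq_of_lt (by omega) (by omega)
        rw [hdiv, hmod]
        have h1 : (n % G).toNat = (n % G - 1).toNat + 1 := by omega
        have h2 : ((g' : Int) - (n % G - 1)).toNat = (G - n % G).toNat := by omega
        rw [h1, h2, List.replicate_succ]
        simp
    · -- remainder exhausted: this and all later groups take exactly n/G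
      simp only [if_neg h0]
      have hr : n % G = 0 := by omega
      have hrem : n - (n / G + 0) = 0 + n / G * (g' : Int) := by
        linear_combination -hq + (n / G) * hgg + hr
      by_cases hg'0 : g' = 0
      · subst hg'0
        simp only [num_to_groups_alt_go]
        have hG1 : G = 1 := by omega
        rw [hr, hG1]
        norm_num
      · have hg'pos : (0 : Int) < (g' : Int) := by
          exact_mod_cast Nat.pos_of_ne_zero hg'0
        have hle' : (g' : Int) ≤ n - (n / G + 0) := by nlinarith [hrem]
        rw [ih (n - (n / G + 0)) hg'pos hle']
        have hdiv : (n - (n / G + 0)) / (g' : Int) = n / G := by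
          rw [hrem, Int.add_mul_ediv_right _ _ (by omega : (g' : Int) ≠ 0)]
          simp
        have hmod : (n - (n / G + 0)) % (g' : Int) = 0 := by
          rw [hrem, mul_comm (n / G) ((g' : Nat) : Int), Int.add_mul_emod_self_left]; simp
        rw [hdiv, hmod, hr]
        simp only [Int.toNat_zero, List.replicate_zero, List.nil_append, Int.sub_zero]
        rw [show G.toNat = (g' : Int).toNat + 1 by omega, List.replicate_succ]
        norm_num

-- ===== VERDICT (by name: the statement is the Claim_ definition above) =====
theorem num_to_groups_spec : Claim_equal_num_to_groups := by
  intro num groups _ hpre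
  obtain ⟨hg, hle⟩ := hpre
  have hmod : PySem.Int.mod num groups = num % groups :=
    PySem.Int.mod_eq_emod_of_pos hg
  have hdiv : PySem.Int.floordiv num groups = num / groups :=
    PySem.Int.floordiv_eq_ediv_of_pos hg
  have hr0 : 0 ≤ num % groups := Int.emod_nonneg _ (by omega)
  have hrlt : num % groups < groups := Int.emod_lt_of_pos _ hg
  show num_to_groups num groups = num_to_groups_alt num groups
  unfold num_to_groups num_to_groups_alt
  rw [hmod, hdiv, loop_eq_blocks (num / groups) (num % groups) groups hr0 hrlt]
  have hcast : ((groups.toNat : Int)) = groups := by omega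
  rw [go_eq_blocks groups.toNat num (by omega) (by omega)]
  rw [hcast]
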